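-- pv_equiv track=rewrite | github.com/wlkaqw/python | 9.py | func913
-- ===== SOURCE A (Python) =====
-- def func913(dict):
--     if not dict:
--         return ()
--     res=[]
--     for i in range(4):
--         lst1=[]
--         for id,scores in dict.items():
--             lst1.append((scores[i],id))
--         max_score=max(x[0] for x in lst1)
--         top_id=sorted(id for score,id in lst1 if score==max_score)
--         res.append((max_score,top_id))
--     return tuple(res)
-- ===== SOURCE B (Python) =====
-- def func913(dict):
--     if not dict:
--         return ()
--     res = []
--     for i in range(4):
--         best = 0
--         ids = []
--         for id, scores in dict.items():
--             v = scores[i]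
--             if not ids or v > best:
--                 best, ids = v, [id]
--             elif v == best:
--                 ids.append(id)
--         res.append((best, sorted(ids)))
--     return tuple(res)
-- ===== Notes on version B (the rewrite author's own statement) =====
-- stated objective: simpler
-- what changed: Each column's max-then-filter (build a score list, scan for max, rescan to filter, sort) is replaced by a single running-max scan that maintains the current best score and the list of ids achieving it (strict > resets, == appends), sorting only the final achiever list.
import Mathlib
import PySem

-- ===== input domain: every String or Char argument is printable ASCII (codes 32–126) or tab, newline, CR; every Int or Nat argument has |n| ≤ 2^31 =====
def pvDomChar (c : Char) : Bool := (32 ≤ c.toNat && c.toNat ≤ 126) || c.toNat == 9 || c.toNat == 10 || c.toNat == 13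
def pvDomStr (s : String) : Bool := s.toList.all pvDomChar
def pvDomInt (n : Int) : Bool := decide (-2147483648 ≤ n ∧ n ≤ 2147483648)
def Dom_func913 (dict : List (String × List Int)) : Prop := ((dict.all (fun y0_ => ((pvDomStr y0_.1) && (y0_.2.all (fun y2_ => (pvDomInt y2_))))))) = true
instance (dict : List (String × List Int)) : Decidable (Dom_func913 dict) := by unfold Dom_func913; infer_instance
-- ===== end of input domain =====

-- B replaces A's per-column build-list / max() / filter / sort with a single running-max
-- scan per column keeping the achiever ids; the return value of A is reproduced exactly.

-- ===== PORT A =====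
def func913 (dict : List (String × List Int)) : List (Int × List String) :=
  if dict = [] then []
  else
    (PySem.List.pyRange 0 4 1).foldl (fun res i =>
      let lst1 := dict.foldl
        (fun l p => l ++ [(((PySem.List.pyGet? p.2 i).getD 0), p.1)])
        ([] : List (Int × String))
      let maxScore := (PySem.List.max? (lst1.map (fun x => x.1)) (fun x => x)).getD 0
      let topId := PySem.List.sorted
        ((lst1.filter (fun x => x.1 == maxScore)).map (fun x => x.2)) (fun x => x) false
      res ++ [(maxScore, topId)]) []

-- ===== PORT B =====
def func913_alt (dict : List (String × List Int)) : List (Int × List String) :=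
  if dict = [] then []
  else
    (PySem.List.pyRange 0 4 1).foldl (fun res i =>
      let st := dict.foldl
        (fun (st : Int × List String) p =>
          let v := (PySem.List.pyGet? p.2 i).getD 0
          if st.2 = [] ∨ v > st.1 then (v, [p.1])
          else if v = st.1 then (st.1, st.2 ++ [p.1])
          else st)
        ((0 : Int), ([] : List String))
      res ++ [(st.1, PySem.List.sorted st.2 (fun x => x) false)]) []

-- ===== PRECONDITION & SPEC =====
-- Pre_ excludes score lists shorter than 4 (A raises IndexError there) and association
-- lists with duplicate keys, which do not represent a Python dict (dict collapses them).
def Pre_func913 (dict : List (String × List Int)) : Prop :=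
  (dict.map Prod.fst).Nodup ∧ ∀ p ∈ dict, 4 ≤ p.2.length
instance (dict : List (String × List Int)) : Decidable (Pre_func913 dict) := by
  unfold Pre_func913; infer_instance
def pvWitness_func913 : (List (String × List Int)) :=
  [("a", [1, 2, 3, 4]), ("b", [4, 3, 2, 1])]
def Spec_func913 (dict : List (String × List Int)) (out : List (Int × List String)) : Prop := out = func913_alt dict
instance (dict : List (String × List Int)) (out : List (Int × List String)) : Decidable (Spec_func913 dict out) := by unfold Spec_func913; infer_instance

-- ===== CLAIM (what is proved, stated in full; the proofs are below) =====
def Claim_equal_func913 : Prop := ∀ (dict : List (String × List Int)), Dom_func913 dict → Pre_func913 dict → Spec_func913 dict (func913 dict)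

-- ===== LEMMAS AND PROOFS =====

def pvVal (i : Int) (p : String × List Int) : Int := (PySem.List.pyGet? p.2 i).getD 0

def pvStep (i : Int) (st : Int × List String) (p : String × List Int) : Int × List String :=
  let v := pvVal i p
  if st.2 = [] ∨ v > st.1 then (v, [p.1])
  else if v = st.1 then (st.1, st.2 ++ [p.1])
  else st

def pvM (i : Int) (b : Int) (xs : List (String × List Int)) : Int :=
  xs.foldl (fun a p => max a (pvVal i p)) b

def pvBodyA (i : Int) (dict : List (String × List Int)) : Int × List String :=
  let lst1 := dict.foldl
    (fun l p => l ++ [(((PySem.List.pyGet? p.2 i).getD 0), p.1)])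
    ([] : List (Int × String))
  let maxScore := (PySem.List.max? (lst1.map (fun x => x.1)) (fun x => x)).getD 0
  let topId := PySem.List.sorted
    ((lst1.filter (fun x => x.1 == maxScore)).map (fun x => x.2)) (fun x => x) false
  (maxScore, topId)

def pvBodyB (i : Int) (dict : List (String × List Int)) : Int × List String :=
  let st := dict.foldl
    (fun (st : Int × List String) p =>
      let v := (PySem.List.pyGet? p.2 i).getD 0
      if st.2 = [] ∨ v > st.1 then (v, [p.1])
      else if v = st.1 then (st.1, st.2 ++ [p.1])
      else st)
    ((0 : Int), ([] : List String))
  (st.1, PySem.List.sorted st.2 (fun x => x) false)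

theorem pv_le_M (i : Int) (xs : List (String × List Int)) (b : Int) : b ≤ pvM i b xs := by
  induction xs generalizing b with
  | nil => simp [pvM]
  | cons x xs ih =>
      simp only [pvM, List.foldl_cons]
      exact le_trans (le_max_left _ _) (ih (max b (pvVal i x)))

theorem pv_run (i : Int) (xs : List (String × List Int)) :
    ∀ (b : Int) (s : List String), s ≠ [] →
    xs.foldl (pvStep i) (b, s) =
      (pvM i b xs,
       (if b = pvM i b xs then s else []) ++
         (xs.filter (fun p => pvVal i p == pvM i b xs)).map Prod.fst) := by
  induction xs with
  | nil => intro b s _; simp [pvM]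
  | cons x xs ih =>
      intro b s hs
      have hM : pvM i b (x :: xs) = pvM i (max b (pvVal i x)) xs := by
        simp [pvM]
      by_cases hv : pvVal i x > b
      · have hstep : pvStep i (b, s) x = (pvVal i x, [x.1]) := by
          simp [pvStep, hv]
        have hmax : max b (pvVal i x) = pvVal i x := max_eq_right (le_of_lt hv)
        have hle : pvVal i x ≤ pvM i (pvVal i x) xs := pv_le_M i xs _
        have hbne : ¬ b = pvM i (pvVal i x) xs := by omega
        rw [List.foldl_cons, hstep, ih _ _ (by simp)]
        rw [hM, hmax, if_neg hbne]
        by_cases hx : pvVal i x = pvM i (pvVal i x) xs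
        · have hxt : (pvVal i x == pvM i (pvVal i x) xs) = true := beq_iff_eq.mpr hx
          rw [if_pos hx]
          simp [hxt]
        · have hxf : (pvVal i x == pvM i (pvVal i x) xs) = false :=
            beq_eq_false_iff_ne.mpr hx
          rw [if_neg hx]
          simp [hxf]
      · have hmax : max b (pvVal i x) = b := max_eq_left (le_of_not_gt hv)
        by_cases he : pvVal i x = b
        · have hstep : pvStep i (b, s) x = (b, s ++ [x.1]) := by
            simp [pvStep, hs, he]
          rw [List.foldl_cons, hstep, ih _ _ (by simp [hs]), hM, hmax]
          by_cases hb : b = pvM i b xs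
          · rw [if_pos hb, if_pos hb]
            have hxt : (pvVal i x == pvM i b xs) = true :=
              beq_iff_eq.mpr (he.trans hb)
            simp only [List.filter_cons, hxt, if_true, List.map_cons,
              List.append_assoc, List.singleton_append]
          · rw [if_neg hb, if_neg hb]
            have hxf : (pvVal i x == pvM i b xs) = false := by
              simp [he]; exact hb
            simp [hxf]
        · have hstep : pvStep i (b, s) x = (b, s) := by
            simp [pvStep, hs, hv, he]
          rw [List.foldl_cons, hstep, ih _ _ hs, hM, hmax]
          have hble : b ≤ pvM i b xs := pv_le_M i xs b
          have hvlt : pvVal i x < b := lt_of_le_of_ne (le_of_not_gt hv) he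
          have hxf : (pvVal i x == pvM i b xs) = false := by
            simp; omega
          simp [hxf]

theorem pv_foldl_append {α β : Type} (f : α → β) :
    ∀ (xs : List α) (acc : List β),
    xs.foldl (fun l x => l ++ [f x]) acc = acc ++ xs.map f := by
  intro xs
  induction xs with
  | nil => simp
  | cons x xs ih => intro acc; simp [ih]

theorem pv_fm (i m : Int) : ∀ xs : List (String × List Int),
    ((xs.map (fun p => (pvVal i p, p.1))).filter (fun x => x.1 == m)).map (fun x => x.2)
      = (xs.filter (fun p => pvVal i p == m)).map Prod.fst := by
  intro xs
  induction xs with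
  | nil => simp
  | cons x xs ih =>
      by_cases hx : pvVal i x = m
      · simp [hx, ih]
      · simp [hx, ih]

-- the two per-column loop bodies agree on a nonempty dict
theorem pv_col (i : Int) (q : String × List Int) (rest : List (String × List Int)) :
    pvBodyA i (q :: rest) = pvBodyB i (q :: rest) := by
  have hlst : (q :: rest).foldl
      (fun l p => l ++ [(((PySem.List.pyGet? p.2 i).getD 0), p.1)])
      ([] : List (Int × String)) = (q :: rest).map (fun p => (pvVal i p, p.1)) := by
    simpa [pvVal] using pv_foldl_append (fun p : String × List Int => (pvVal i p, p.1)) (q :: rest) []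
  have hmax : (PySem.List.max?
      (((q :: rest).map (fun p => (pvVal i p, p.1))).map (fun x => x.1)) (fun x => x)).getD 0
      = pvM i (pvVal i q) rest := by
    rw [List.map_map]
    have h : (q :: rest).map ((fun x : Int × String => x.1) ∘ (fun p => (pvVal i p, p.1)))
        = pvVal i q :: rest.map (pvVal i) := by simp [Function.comp]
    rw [h, PySem.List.max?_id_cons]
    simp [pvM, List.foldl_map]
  have hfoldB : (q :: rest).foldl
      (fun (st : Int × List String) p =>
        let v := (PySem.List.pyGet? p.2 i).getD 0
        if st.2 = [] ∨ v > st.1 then (v, [p.1])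
        else if v = st.1 then (st.1, st.2 ++ [p.1])
        else st)
      ((0 : Int), ([] : List String)) = (q :: rest).foldl (pvStep i) (0, []) := rfl
  have hstep0 : pvStep i ((0 : Int), ([] : List String)) q = (pvVal i q, [q.1]) := by
    simp [pvStep]
  have hrun := pv_run i rest (pvVal i q) [q.1] (by simp)
  have hfilt : (((q :: rest).map (fun p => (pvVal i p, p.1))).filter
        (fun x => x.1 == pvM i (pvVal i q) rest)).map (fun x => x.2)
      = (if pvVal i q = pvM i (pvVal i q) rest then [q.1] else []) ++
          (rest.filter (fun p => pvVal i p == pvM i (pvVal i q) rest)).map Prod.fst := by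
    rw [List.map_cons, List.filter_cons]
    by_cases hq : pvVal i q = pvM i (pvVal i q) rest
    · have hqt : ((pvVal i q, q.1).1 == pvM i (pvVal i q) rest) = true := beq_iff_eq.mpr hq
      rw [if_pos hq]
      simp [hqt, pv_fm]
    · have hqf : ((pvVal i q, q.1).1 == pvM i (pvVal i q) rest) = false :=
        beq_eq_false_iff_ne.mpr hq
      rw [if_neg hq]
      simp [hqf, pv_fm]
  simp only [pvBodyA, pvBodyB]
  rw [hlst, hmax, hfoldB, List.foldl_cons, hstep0, hrun, hfilt]

-- ===== VERDICT (by name: the statement is the Claim_ definition above) =====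
theorem func913_spec : Claim_equal_func913 := by
  intro dict _ _
  unfold Spec_func913
  cases dict with
  | nil => rfl
  | cons q rest =>
      show func913 (q :: rest) = func913_alt (q :: rest)
      have h4 : PySem.List.pyRange 0 4 1 = [0, 1, 2, 3] := by decide
      unfold func913 func913_alt
      rw [if_neg (by simp), if_neg (by simp), h4]
      show [pvBodyA 0 (q :: rest), pvBodyA 1 (q :: rest), pvBodyA 2 (q :: rest),
              pvBodyA 3 (q :: rest)]
          = [pvBodyB 0 (q :: rest), pvBodyB 1 (q :: rest), pvBodyB 2 (q :: rest),
              pvBodyB 3 (q :: rest)]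
      rw [pv_col 0 q rest, pv_col 1 q rest, pv_col 2 q rest, pv_col 3 q rest]
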